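-- pv_equiv track=rewrite | github.com/wslwlm/leetcode-practice | 29. Divide Two Integers/Divide-Two-Integers.py | _multi_divide
-- ===== SOURCE A (Python) =====
-- def _multi_divide(divisor, dividend):
--     """
--     翻倍除法，如果可以被除，则下一步除数翻倍，直至除数大于被除数，
--     返回商加总的结果与被除数的剩余值；
--     这里就不做异常处理了；
--     :param int divisor
--     :param int dividend
--     :return tuple result, left_dividend
--     """
--     result = 0
--     times_count = 1
--     while divisor <= dividend:
--         dividend -= divisor
--         result += times_count
--         times_count += times_count
--         divisor += divisor
--     return result, dividend
-- ===== SOURCE B (Python) =====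
-- def _multi_divide(divisor, dividend):
--     if divisor > dividend:
--         return 0, dividend
--     q = dividend // divisor
--     result = (1 << ((q + 1).bit_length() - 1)) - 1
--     return result, dividend - divisor * result
-- ===== Notes on version B (the rewrite author's own statement) =====
-- stated objective: simpler
-- what changed: Replaced A's doubling subtract-and-accumulate while-loop with a closed form: q = dividend // divisor, result = (1 << ((q+1).bit_length()-1)) - 1, remainder = dividend - divisor*result.
import Mathlib
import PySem

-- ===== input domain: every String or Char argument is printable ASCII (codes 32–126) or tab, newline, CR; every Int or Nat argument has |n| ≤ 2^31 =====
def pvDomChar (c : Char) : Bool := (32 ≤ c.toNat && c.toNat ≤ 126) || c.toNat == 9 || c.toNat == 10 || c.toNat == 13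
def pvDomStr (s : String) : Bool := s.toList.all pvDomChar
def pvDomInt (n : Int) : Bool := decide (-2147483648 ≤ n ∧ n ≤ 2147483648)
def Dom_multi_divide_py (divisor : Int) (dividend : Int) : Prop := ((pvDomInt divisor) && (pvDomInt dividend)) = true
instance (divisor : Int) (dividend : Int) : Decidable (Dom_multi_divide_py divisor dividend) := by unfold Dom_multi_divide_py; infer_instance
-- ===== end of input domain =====

-- B replaces A's doubling-subtraction loop by a closed form (one floor division and one
-- bit_length); objective: simpler. Pre_ excludes divisor ≤ dividend with divisor ≤ 0,
-- where A's while-loop never terminates.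

-- ===== PORT A =====
-- A's while-loop; the '0 < divisor' conjunct in the guard is a totality guard only:
-- where it differs from Python's 'divisor <= dividend', the Python loop diverges
-- (those inputs are outside Pre_).
def pyLoopA (divisor dividend result times : Int) : Int × Int :=
  if _h : divisor ≤ dividend ∧ 0 < divisor then
    pyLoopA (divisor + divisor) (dividend - divisor) (result + times) (times + times)
  else (result, dividend)
termination_by dividend.toNat
decreasing_by omega

def multi_divide_py (divisor : Int) (dividend : Int) : Int × Int :=
  pyLoopA divisor dividend 0 1

-- ===== PORT B =====
def multi_divide_py_alt (divisor : Int) (dividend : Int) : Int × Int :=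
  if divisor > dividend then (0, dividend)
  else
    let q := PySem.Int.floordiv dividend divisor
    -- K = (q+1).bit_length() - 1 ; result = (1 << K) - 1 written as 2^K - 1
    let K := PySem.Int.bitLength (q + 1) - 1
    let result : Int := 2 ^ K - 1
    (result, dividend - divisor * result)

-- ===== PRECONDITION & SPEC =====
-- Pre_ excludes exactly the inputs (divisor ≤ 0 and divisor ≤ dividend) on which A's
-- while-loop runs forever (A never returns there).
def Pre_multi_divide_py (divisor : Int) (dividend : Int) : Prop :=
  0 < divisor ∨ dividend < divisor
instance (divisor : Int) (dividend : Int) : Decidable (Pre_multi_divide_py divisor dividend) := by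
  unfold Pre_multi_divide_py; infer_instance
def pvWitness_multi_divide_py : Int × Int := (3, 100)

def Spec_multi_divide_py (divisor : Int) (dividend : Int) (out : Int × Int) : Prop := out = multi_divide_py_alt divisor dividend
instance (divisor : Int) (dividend : Int) (out : Int × Int) : Decidable (Spec_multi_divide_py divisor dividend out) := by unfold Spec_multi_divide_py; infer_instance

-- ===== CLAIM (what is proved, stated in full; the proofs are below) =====
def Claim_equal_multi_divide_py : Prop := ∀ (divisor : Int) (dividend : Int), Dom_multi_divide_py divisor dividend → Pre_multi_divide_py divisor dividend → Spec_multi_divide_py divisor dividend (multi_divide_py divisor dividend)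

-- ===== LEMMAS AND PROOFS =====

-- closed-form exponent of the loop
def loopExp (divisor dividend : Int) : Nat :=
  PySem.Int.bitLength (PySem.Int.floordiv dividend divisor + 1) - 1

lemma bitLength_pos {n : Int} (hn : n ≠ 0) : 0 < PySem.Int.bitLength n := by
  have h := PySem.Int.lt_two_pow_bitLength n
  by_contra h0
  simp only [Nat.not_lt, Nat.le_zero] at h0
  rw [h0] at h
  simp at h
  exact hn (by omega)

lemma floordiv_nonneg' {a b : Int} (ha : 0 ≤ a) (hb : 0 < b) :
    0 ≤ PySem.Int.floordiv a b := by
  have := (PySem.Int.le_floordiv_iff_mul_le (a := a) (b := b) (q := 0) hb)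
  exact this.mpr (by omega)

lemma floordiv_zero_of_lt {a b : Int} (ha : 0 ≤ a) (hab : a < b) :
    PySem.Int.floordiv a b = 0 := by
  have hb : 0 < b := lt_of_le_of_lt ha hab
  exact (PySem.Int.floordiv_eq_iff_of_pos hb).mpr (by constructor <;> omega)

-- halving step for the exponent
lemma loopExp_step {d n : Int} (hd : 0 < d) (hdn : d ≤ n) :
    loopExp d n = loopExp (d + d) (n - d) + 1 := by
  unfold loopExp
  set q := PySem.Int.floordiv n d with hq
  set q' := PySem.Int.floordiv (n - d) (d + d) with hq'
  have h2d : (0:Int) < d + d := by omega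
  have hqb := (PySem.Int.floordiv_eq_iff_of_pos hd (a := n) (q := q)).mp rfl
  have hq'b := (PySem.Int.floordiv_eq_iff_of_pos h2d (a := n - d) (q := q')).mp rfl
  have hq1 : 1 ≤ q := (PySem.Int.le_floordiv_iff_mul_le hd).mpr (by omega)
  have hq'0 : 0 ≤ q' := floordiv_nonneg' (by omega) h2d
  -- q' * 2d ≤ n - d and n < (q+1)d  ⟹  2q' < q
  have h1 : 2 * q' < q := by
    have : q' * (d + d) < q * d := by nlinarith [hqb.2, hq'b.1]
    nlinarith
  -- q d ≤ n and n - d < (q'+1) 2d  ⟹  q < 2q' + 3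
  have h2 : q < 2 * q' + 3 := by
    have : q * d < (q' + 2) * (d + d) := by nlinarith [hqb.1, hq'b.2]
    nlinarith
  -- so floordiv (q+1) 2 = q' + 1
  have hhalf : PySem.Int.floordiv (q + 1) 2 = q' + 1 :=
    (PySem.Int.floordiv_eq_iff_of_pos (by norm_num)).mpr (by constructor <;> omega)
  have hbl := PySem.Int.bitLength_of_pos (n := q + 1) (by omega)
  rw [hbl, hhalf]
  have : 0 < PySem.Int.bitLength (q' + 1) := bitLength_pos (by omega)
  omega

lemma loopExp_zero {d n : Int} (hd : 0 < d) (hn : 0 ≤ n) (hnd : n < d) :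
    loopExp d n = 0 := by
  unfold loopExp
  rw [floordiv_zero_of_lt hn hnd]
  decide

-- the loop computes the closed form
lemma pyLoopA_closed (n d r t : Int) (hd : 0 < d) (hn : 0 ≤ n) :
    pyLoopA d n r t =
      (r + t * ((2:Int) ^ loopExp d n - 1), n - d * ((2:Int) ^ loopExp d n - 1)) := by
  by_cases hdn : d ≤ n
  · rw [pyLoopA]
    simp only [hdn, hd, and_self, dite_true]
    rw [pyLoopA_closed (n - d) (d + d) (r + t) (t + t) (by omega) (by omega)]
    rw [loopExp_step hd hdn]
    simp only [Prod.mk.injEq, pow_succ]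
    constructor <;> ring
  · rw [pyLoopA]
    simp only [hdn, false_and, dite_false]
    rw [loopExp_zero hd hn (by omega)]
    norm_num
termination_by n.toNat
decreasing_by omega

-- ===== VERDICT (by name: the statement is the Claim_ definition above) =====
theorem multi_divide_py_spec : Claim_equal_multi_divide_py := by
  intro d n _ hpre
  unfold Spec_multi_divide_py multi_divide_py multi_divide_py_alt
  by_cases hdn : d ≤ n
  · have hd : 0 < d := by unfold Pre_multi_divide_py at hpre; omega
    rw [pyLoopA_closed n d 0 1 hd (by omega)]
    simp only [show ¬ (d > n) by omega, if_neg, not_false_iff]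
    unfold loopExp
    simp only [Prod.mk.injEq]
    exact ⟨by ring, trivial⟩
  · rw [pyLoopA]
    simp only [hdn, false_and, dite_false]
    simp [show d > n by omega]
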